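-- pv_equiv track=rewrite | github.com/NicoloMarsucco/advent-of-code-2025 | solutions/day07.py | part2
-- ===== SOURCE A (Python) =====
-- def part2(data: str) -> int:
--     data = data.splitlines()
--     curr_beams = {}
--     curr_beams[data[0].find("S")] = 1
--     for i in range(2,len(data),2):
--         new_beams = {}
--         for beam, trajectories in curr_beams.items():
--             if data[i][beam] == "^":
--                 new_beams[beam - 1] = new_beams.get(beam - 1, 0) + trajectories
--                 new_beams[beam + 1] = new_beams.get(beam + 1, 0) + trajectories
--             else:
--                 new_beams[beam] = new_beams.get(beam, 0) + trajectories
--         curr_beams = new_beams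
--
--     return sum(curr_beams.values())
-- ===== SOURCE B (Python) =====
-- def part2(data: str) -> int:
--     lines = data.splitlines()
--     start = lines[0].find("S")
--     # forward pass: for each splitter row, the ordered set of positions a beam can occupy there
--     reach = []
--     front = [start]
--     for i in range(2, len(lines), 2):
--         reach.append((i, front))
--         nxt = []
--         seen = set()
--         for p in front:
--             if lines[i][p] == "^":
--                 targets = (p - 1, p + 1)
--             else:
--                 targets = (p,)
--             for q in targets:
--                 if q not in seen:
--                     seen.add(q)
--                     nxt.append(q)
--         front = nxt
--     # backward pass: trajectories from each reachable position down to the bottom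
--     vals = {p: 1 for p in front}
--     for i, positions in reversed(reach):
--         vals = {p: (vals[p - 1] + vals[p + 1]) if lines[i][p] == "^" else vals[p]
--                 for p in positions}
--     return vals[start]
-- ===== Notes on version B (the rewrite author's own statement) =====
-- stated objective: alternative
-- what changed: Replaces A's single forward sweep that pushes a dict of live beam counts down the grid with a two-phase scheme: a forward pass collecting only the ordered set of reachable beam positions per splitter row, then a backward dynamic program computing trajectories-to-bottom for exactly those positions, reading the answer at the start position.
-- outside the precondition, e.g. on part2('^^\nS\nxx\n.\nx'): A returns 1, B returns 1
import Mathlib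
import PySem

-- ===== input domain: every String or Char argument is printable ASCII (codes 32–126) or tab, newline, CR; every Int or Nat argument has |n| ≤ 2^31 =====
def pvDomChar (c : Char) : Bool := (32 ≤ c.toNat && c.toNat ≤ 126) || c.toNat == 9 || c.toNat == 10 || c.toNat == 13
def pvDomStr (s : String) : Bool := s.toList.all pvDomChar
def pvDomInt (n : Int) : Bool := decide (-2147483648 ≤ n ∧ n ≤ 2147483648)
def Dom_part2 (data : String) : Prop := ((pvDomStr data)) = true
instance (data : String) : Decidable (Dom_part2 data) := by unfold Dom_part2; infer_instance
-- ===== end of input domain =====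

-- B replaces A's single forward sweep of a dict of beam counts by a forward pass that
-- records only the reachable beam positions per splitter row followed by a backward
-- dynamic program computing trajectories-to-bottom on those positions (alternative
-- algorithm, same cost).

-- ===== PORT A =====
-- new_beams[p] = new_beams.get(p, 0) + v
def addCount (nb : PySem.Dict Int Int) (p v : Int) : PySem.Dict Int Int :=
  nb.insert p (nb.getD p 0 + v)

-- the body of A's outer loop: one row of 'for beam, trajectories in curr_beams.items()'
def part2Inner (row : List Char) (curr : PySem.Dict Int Int) : PySem.Dict Int Int :=
  curr.items.foldl (fun nb bt =>
    if PySem.List.pyGet? row bt.1 == some '^' then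
      addCount (addCount nb (bt.1 - 1) bt.2) (bt.1 + 1) bt.2
    else addCount nb bt.1 bt.2) PySem.Dict.empty

def part2 (data : String) : Int :=
  let lines := PySem.Str.splitlines data
  let curr : PySem.Dict Int Int :=
    PySem.Dict.empty.insert (PySem.Str.find (PySem.List.pyGetD lines 0 "") "S") 1
  let curr := (PySem.List.pyRange 2 (lines.length : Int) 2).foldl
      (fun curr i => part2Inner (PySem.List.pyGetD lines i "").toList curr) curr
  curr.values.sum

-- ===== PORT B =====
-- lines[i] as a character list (B's indexing helper)
def rowOf (lines : List String) (i : Int) : List Char :=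
  (PySem.List.pyGetD lines i "").toList

-- B's forward inner loop: the ordered set ('seen'/'nxt') of next-row beam positions
def fwdStep (row : List Char) (front : List Int) : List Int :=
  front.foldl (fun nxt p =>
    if PySem.List.pyGet? row p == some '^' then
      PySem.Set.add (PySem.Set.add nxt (p - 1)) (p + 1)
    else PySem.Set.add nxt p) PySem.Set.empty

-- B's backward dict comprehension over one row's reachable positions; Python's
-- vals[p] would raise KeyError on a missing key, getD 0 is exact here because
-- every key looked up was inserted by the forward pass (proved below)
def bwdStep (row : List Char) (vals : PySem.Dict Int Int) (positions : List Int) :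
    PySem.Dict Int Int :=
  positions.foldl (fun nv p =>
    nv.insert p (if PySem.List.pyGet? row p == some '^' then
      vals.getD (p - 1) 0 + vals.getD (p + 1) 0
    else vals.getD p 0)) PySem.Dict.empty

def part2_alt (data : String) : Int :=
  let lines := PySem.Str.splitlines data
  let start := PySem.Str.find (PySem.List.pyGetD lines 0 "") "S"
  let st := (PySem.List.pyRange 2 (lines.length : Int) 2).foldl
      (fun (st : List (Int × List Int) × List Int) i =>
        (st.1 ++ [(i, st.2)], fwdStep (rowOf lines i) st.2)) ([], [start])
  let vals0 : PySem.Dict Int Int := st.2.foldl (fun d p => d.insert p 1) PySem.Dict.empty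
  let vals := st.1.reverse.foldl (fun vals pr => bwdStep (rowOf lines pr.1) vals pr.2) vals0
  vals.getD start 0

-- ===== PRECONDITION & SPEC =====
-- Pre_ excludes exactly-and-only-by-overapproximation the inputs where the Python A
-- raises IndexError (empty input, or a reached beam position outside its splitter
-- row): the exact raise-set is not closed-form, so Pre_ uses the checkable window
-- bound "every splitter row covers the whole beam window reachable at its depth";
-- this is conservative — on irregular grids whose short rows are never reached by a
-- live beam A still returns, and B returns the same value there.
def Pre_part2 (data : String) : Prop :=
  let lines := PySem.Str.splitlines data
  let s := PySem.Str.find (PySem.List.pyGetD lines 0 "") "S"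
  lines ≠ [] ∧ ∀ j < lines.length, 2 + 2 * j < lines.length →
    (s + (j : Int) + 1 ≤ PySem.Str.len (PySem.List.pyGetD lines ((2 + 2 * j : Nat) : Int) "") ∧
     (j : Int) - s ≤ PySem.Str.len (PySem.List.pyGetD lines ((2 + 2 * j : Nat) : Int) ""))
instance (data : String) : Decidable (Pre_part2 data) := by unfold Pre_part2; infer_instance

def pvWitness_part2 : String := "S\n.\n^"

def Spec_part2 (data : String) (out : Int) : Prop := out = part2_alt data
instance (data : String) (out : Int) : Decidable (Spec_part2 data out) := by unfold Spec_part2; infer_instance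

-- ===== CLAIM (what is proved, stated in full; the proofs are below) =====
def Claim_equal_part2 : Prop := ∀ (data : String), Dom_part2 data → Pre_part2 data → Spec_part2 data (part2 data)

-- ===== LEMMAS AND PROOFS =====

-- number of trajectories from the current position to the bottom of the grid
def traj : List (List Char) → Int → Int
  | [], _ => 1
  | r :: rest, p =>
      if PySem.List.pyGet? r p == some '^' then traj rest (p - 1) + traj rest (p + 1)
      else traj rest p

-- weighted sum of an association list against a valuation g of the positions
def wsum (l : List (Int × Int)) (g : Int → Int) : Int :=
  (l.map (fun q => q.2 * g q.1)).sum

theorem pv_values_eq_map_snd (d : PySem.Dict Int Int) : d.values = d.items.map Prod.snd := by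
  rfl

theorem wsum_update_list (l : List (Int × Int)) (p vp v : Int) (g : Int → Int)
    (hn : (l.map Prod.fst).Nodup) (hm : (p, vp) ∈ l) :
    wsum (l.map (fun q => if q.1 == p then (p, vp + v) else q)) g = wsum l g + v * g p := by
  induction l with
  | nil => cases hm
  | cons q t ih =>
    simp only [List.map_cons, List.nodup_cons] at hn
    by_cases hq : q.1 = p
    · have hqt : q = (p, vp) := by
        rcases List.mem_cons.mp hm with h | h
        · exact h.symm
        · exact absurd (hq ▸ List.mem_map_of_mem h) hn.1
      have ht : ∀ q' ∈ t, (if q'.1 == p then (p, vp + v) else q') = q' := by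
        intro q' hq'
        have hne : q'.1 ≠ p := by
          intro h
          exact hn.1 (hq ▸ h ▸ List.mem_map_of_mem hq')
        simp [hne]
      simp only [List.map_cons, hqt, beq_self_eq_true, if_pos]
      rw [List.map_congr_left ht, List.map_id']
      simp [wsum]
      ring
    · have hm' : (p, vp) ∈ t := by
        rcases List.mem_cons.mp hm with h | h
        · exact absurd (congrArg Prod.fst h.symm) hq
        · exact h
      simp only [List.map_cons]
      have : (q.1 == p) = false := by simp [hq]
      rw [this]
      simp only [if_neg Bool.false_ne_true]
      simp only [wsum, List.map_cons, List.sum_cons] at *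
      rw [ih hn.2 hm']
      ring

theorem wsum_addCount (d : PySem.Dict Int Int) (hn : d.keys.Nodup) (p v : Int) (g : Int → Int) :
    wsum (addCount d p v).items g = wsum d.items g + v * g p := by
  unfold addCount
  cases hc : d.contains p with
  | false =>
    rw [PySem.Dict.items_insert_of_not_contains d _ hc,
        PySem.Dict.getD_of_not_contains d _ hc]
    simp [wsum]
  | true =>
    have hkp : p ∈ d.items.map Prod.fst := by
      have : d.keys = d.items.map Prod.fst := rfl
      rw [← this]
      exact (PySem.Dict.contains_iff_mem_keys d p).mp hc
    rcases List.mem_map.mp hkp with ⟨q, hq, hfst⟩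
    have hm : (p, q.2) ∈ d.items := by
      have : q = (p, q.2) := by
        cases q
        simp at hfst
        simp [hfst]
      exact this ▸ hq
    have hg : d.getD p 0 = q.2 := PySem.Dict.getD_of_mem_items d hm hn 0
    rw [PySem.Dict.items_insert_of_contains d _ hc, hg]
    have hn' : (d.items.map Prod.fst).Nodup := hn
    exact wsum_update_list d.items p q.2 v g hn' hm

theorem nodup_keys_addCount (d : PySem.Dict Int Int) (hn : d.keys.Nodup) (p v : Int) :
    (addCount d p v).keys.Nodup := by
  exact PySem.Dict.nodup_keys_insert d p _ hn

theorem wsum_inner (row : List Char) (g : Int → Int) :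
    ∀ (l : List (Int × Int)) (d : PySem.Dict Int Int), d.keys.Nodup →
    wsum (l.foldl (fun nb bt =>
      if PySem.List.pyGet? row bt.1 == some '^' then
        addCount (addCount nb (bt.1 - 1) bt.2) (bt.1 + 1) bt.2
      else addCount nb bt.1 bt.2) d).items g
    = wsum d.items g
      + (l.map (fun bt => bt.2 * (if PySem.List.pyGet? row bt.1 == some '^'
            then g (bt.1 - 1) + g (bt.1 + 1) else g bt.1))).sum := by
  intro l
  induction l with
  | nil => intro d hn; simp
  | cons bt t ih =>
    intro d hn
    simp only [List.foldl_cons, List.map_cons, List.sum_cons]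
    by_cases h : (PySem.List.pyGet? row bt.1 == some '^') = true
    · rw [if_pos h, if_pos h,
        ih _ (nodup_keys_addCount _ (nodup_keys_addCount _ hn _ _) _ _),
        wsum_addCount _ (nodup_keys_addCount _ hn _ _),
        wsum_addCount _ hn]
      ring
    · rw [if_neg h, if_neg h, ih _ (nodup_keys_addCount _ hn _ _), wsum_addCount _ hn]
      ring

theorem nodup_keys_inner (row : List Char) (curr : PySem.Dict Int Int) :
    (part2Inner row curr).keys.Nodup := by
  unfold part2Inner
  have gen : ∀ (l : List (Int × Int)) (d : PySem.Dict Int Int), d.keys.Nodup →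
      (l.foldl (fun nb bt =>
        if PySem.List.pyGet? row bt.1 == some '^' then
          addCount (addCount nb (bt.1 - 1) bt.2) (bt.1 + 1) bt.2
        else addCount nb bt.1 bt.2) d).keys.Nodup := by
    intro l
    induction l with
    | nil => intro d hd; exact hd
    | cons bt t ih =>
      intro d hd
      simp only [List.foldl_cons]
      apply ih
      by_cases h : (PySem.List.pyGet? row bt.1 == some '^') = true
      · rw [if_pos h]
        exact nodup_keys_addCount _ (nodup_keys_addCount _ hd _ _) _ _
      · rw [if_neg h]
        exact nodup_keys_addCount _ hd _ _
  exact gen curr.items PySem.Dict.empty PySem.Dict.nodup_keys_empty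

theorem a_fold (rowsC : List (List Char)) :
    ∀ (d : PySem.Dict Int Int), d.keys.Nodup →
    (rowsC.foldl (fun c r => part2Inner r c) d).values.sum = wsum d.items (traj rowsC) := by
  induction rowsC with
  | nil =>
    intro d hn
    rw [pv_values_eq_map_snd]
    simp [wsum, traj]
  | cons r rest ih =>
    intro d hn
    simp only [List.foldl_cons]
    rw [ih _ (nodup_keys_inner r d)]
    unfold part2Inner
    rw [wsum_inner r (traj rest) d.items PySem.Dict.empty PySem.Dict.nodup_keys_empty]
    simp [wsum, traj, PySem.Dict.empty]

theorem foldl_inner_map (lines : List String) :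
    ∀ (idx : List Int) (d : PySem.Dict Int Int),
    idx.foldl (fun curr i => part2Inner (PySem.List.pyGetD lines i "").toList curr) d
      = (idx.map (rowOf lines)).foldl (fun c r => part2Inner r c) d := by
  intro idx
  induction idx with
  | nil => intro d; rfl
  | cons i t ih => intro d; simp only [List.foldl_cons, List.map_cons]; exact ih _

-- ---- B-side machinery ----

-- the per-row reachable fronts, as produced by B's forward loop
def frontsOf (lines : List String) : List Int → List Int → List (Int × List Int)
  | [], _ => []
  | i :: is, f => (i, f) :: frontsOf lines is (fwdStep (rowOf lines i) f)

def finalFront (lines : List String) : List Int → List Int → List Int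
  | [], f => f
  | i :: is, f => finalFront lines is (fwdStep (rowOf lines i) f)

theorem fold_fwd (lines : List String) :
    ∀ (is : List Int) (acc : List (Int × List Int)) (f : List Int),
    is.foldl (fun (st : List (Int × List Int) × List Int) i =>
        (st.1 ++ [(i, st.2)], fwdStep (rowOf lines i) st.2)) (acc, f)
      = (acc ++ frontsOf lines is f, finalFront lines is f) := by
  intro is
  induction is with
  | nil => intro acc f; simp [frontsOf, finalFront]
  | cons i t ih =>
    intro acc f
    simp only [List.foldl_cons, frontsOf, finalFront]
    rw [ih]
    simp

theorem fwd_nodup (row : List Char) :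
    ∀ (l s : List Int), s.Nodup →
    (l.foldl (fun nxt p =>
      if PySem.List.pyGet? row p == some '^' then
        PySem.Set.add (PySem.Set.add nxt (p - 1)) (p + 1)
      else PySem.Set.add nxt p) s).Nodup := by
  intro l
  induction l with
  | nil => intro s hs; exact hs
  | cons q t ih =>
    intro s hs
    simp only [List.foldl_cons]
    apply ih
    by_cases h : (PySem.List.pyGet? row q == some '^') = true
    · rw [if_pos h]
      exact PySem.Set.nodup_add _ _ (PySem.Set.nodup_add _ _ hs)
    · rw [if_neg h]
      exact PySem.Set.nodup_add _ _ hs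

theorem fwdStep_nodup (row : List Char) (f : List Int) : (fwdStep row f).Nodup :=
  fwd_nodup row f PySem.Set.empty List.nodup_nil

theorem fwd_mono (row : List Char) :
    ∀ (l s : List Int) (x : Int), x ∈ s →
    x ∈ l.foldl (fun nxt p =>
      if PySem.List.pyGet? row p == some '^' then
        PySem.Set.add (PySem.Set.add nxt (p - 1)) (p + 1)
      else PySem.Set.add nxt p) s := by
  intro l
  induction l with
  | nil => intro s x hx; exact hx
  | cons q t ih =>
    intro s x hx
    simp only [List.foldl_cons]
    apply ih
    by_cases h : (PySem.List.pyGet? row q == some '^') = true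
    · rw [if_pos h]
      exact (PySem.Set.mem_add _ _ _).mpr (Or.inl ((PySem.Set.mem_add _ _ _).mpr (Or.inl hx)))
    · rw [if_neg h]
      exact (PySem.Set.mem_add _ _ _).mpr (Or.inl hx)

theorem fwd_covers (row : List Char) :
    ∀ (f s : List Int) (p : Int), p ∈ f →
    (if PySem.List.pyGet? row p == some '^'
      then (p - 1) ∈ f.foldl (fun nxt p =>
              if PySem.List.pyGet? row p == some '^' then
                PySem.Set.add (PySem.Set.add nxt (p - 1)) (p + 1)
              else PySem.Set.add nxt p) s
         ∧ (p + 1) ∈ f.foldl (fun nxt p =>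
              if PySem.List.pyGet? row p == some '^' then
                PySem.Set.add (PySem.Set.add nxt (p - 1)) (p + 1)
              else PySem.Set.add nxt p) s
      else p ∈ f.foldl (fun nxt p =>
              if PySem.List.pyGet? row p == some '^' then
                PySem.Set.add (PySem.Set.add nxt (p - 1)) (p + 1)
              else PySem.Set.add nxt p) s) := by
  intro f
  induction f with
  | nil => intro s p hp; cases hp
  | cons q t ih =>
    intro s p hp
    rcases List.mem_cons.mp hp with h | h
    · subst h
      simp only [List.foldl_cons]
      by_cases hc : (PySem.List.pyGet? row p == some '^') = true
      · rw [if_pos hc, if_pos hc]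
        constructor
        · exact fwd_mono row t _ _ ((PySem.Set.mem_add _ _ _).mpr
            (Or.inl ((PySem.Set.mem_add _ _ _).mpr (Or.inr rfl))))
        · exact fwd_mono row t _ _ ((PySem.Set.mem_add _ _ _).mpr (Or.inr rfl))
      · rw [if_neg hc, if_neg hc]
        exact fwd_mono row t _ _ ((PySem.Set.mem_add _ _ _).mpr (Or.inr rfl))
    · simp only [List.foldl_cons]
      exact ih _ p h

-- getD through an insert-only loop: untouched key
theorem getD_insert_loop_not_mem (g : Int → Int) :
    ∀ (l : List Int) (d : PySem.Dict Int Int) (p : Int), p ∉ l →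
    (l.foldl (fun d q => d.insert q (g q)) d).getD p 0 = d.getD p 0 := by
  intro l
  induction l with
  | nil => intro d p _; rfl
  | cons q t ih =>
    intro d p hp
    simp only [List.foldl_cons]
    have hne : p ≠ q := fun h => hp (by rw [h]; exact List.mem_cons_self ..)
    rw [ih _ p (fun h => hp (List.mem_cons_of_mem _ h))]
    exact PySem.Dict.getD_insert_of_ne d _ _ hne

theorem getD_insert_loop_mem (g : Int → Int) :
    ∀ (l : List Int) (d : PySem.Dict Int Int) (p : Int), l.Nodup → p ∈ l →
    (l.foldl (fun d q => d.insert q (g q)) d).getD p 0 = g p := by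
  intro l
  induction l with
  | nil => intro d p _ hp; cases hp
  | cons q t ih =>
    intro d p hn hp
    simp only [List.nodup_cons] at hn
    simp only [List.foldl_cons]
    rcases List.mem_cons.mp hp with h | h
    · subst h
      rw [getD_insert_loop_not_mem g t _ p hn.1, PySem.Dict.getD_insert_self]
    · exact ih _ p hn.2 h

theorem bwd_main (lines : List String) :
    ∀ (is : List Int) (f : List Int), f.Nodup → ∀ p ∈ f,
    ((frontsOf lines is f).reverse.foldl
        (fun vals pr => bwdStep (rowOf lines pr.1) vals pr.2)
        ((finalFront lines is f).foldl (fun d p => d.insert p 1) PySem.Dict.empty)).getD p 0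
      = traj (is.map (rowOf lines)) p := by
  intro is
  induction is with
  | nil =>
    intro f hn p hp
    simp only [frontsOf, finalFront, List.reverse_nil, List.foldl_nil, List.map_nil]
    rw [show (fun (d : PySem.Dict Int Int) (p : Int) => d.insert p 1)
          = (fun (d : PySem.Dict Int Int) (q : Int) => d.insert q ((fun _ => (1 : Int)) q))
        from rfl,
      getD_insert_loop_mem (fun _ => (1 : Int)) f _ p hn hp]
    rfl
  | cons i t ih =>
    intro f hn p hp
    simp only [frontsOf, finalFront, List.reverse_cons, List.foldl_append,
      List.foldl_cons, List.foldl_nil, List.map_cons]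
    set f' := fwdStep (rowOf lines i) f with hf'
    set vprev := ((frontsOf lines t f').reverse.foldl
        (fun vals pr => bwdStep (rowOf lines pr.1) vals pr.2)
        ((finalFront lines t f').foldl (fun d p => d.insert p 1) PySem.Dict.empty)) with hv
    have hIH : ∀ q ∈ f', vprev.getD q 0 = traj (t.map (rowOf lines)) q :=
      fun q hq => ih f' (fwdStep_nodup _ _) q hq
    unfold bwdStep
    rw [getD_insert_loop_mem
        (fun p => if PySem.List.pyGet? (rowOf lines i) p == some '^' then
            vprev.getD (p - 1) 0 + vprev.getD (p + 1) 0 else vprev.getD p 0)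
        f _ p hn hp]
    have hcov := fwd_covers (rowOf lines i) f PySem.Set.empty p hp
    rw [hf'] at hIH
    unfold fwdStep at hIH
    by_cases hc : (PySem.List.pyGet? (rowOf lines i) p == some '^') = true
    · rw [if_pos hc] at hcov ⊢
      simp only [traj, if_pos hc]
      rw [hIH _ hcov.1, hIH _ hcov.2]
    · rw [if_neg hc] at hcov ⊢
      simp only [traj, if_neg hc]
      rw [hIH _ hcov]

theorem part2_eq (data : String) : part2 data = part2_alt data := by
  simp only [part2, part2_alt]
  set lines := PySem.Str.splitlines data with hlines
  set s := PySem.Str.find (PySem.List.pyGetD lines 0 "") "S" with hs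
  set idx := PySem.List.pyRange 2 (lines.length : Int) 2 with hidx
  -- A's side: the sum of the final dict's values is the weighted trajectory count
  have hd0 : (PySem.Dict.empty.insert s 1 : PySem.Dict Int Int).keys.Nodup :=
    PySem.Dict.nodup_keys_insert _ _ _ PySem.Dict.nodup_keys_empty
  rw [foldl_inner_map lines idx _, a_fold (idx.map (rowOf lines)) _ hd0,
      PySem.Dict.items_insert_of_not_contains _ _ (by simp)]
  -- B's side: the forward fold produces the fronts, the backward fold yields traj
  rw [fold_fwd lines idx [] [s]]
  simp only [List.nil_append]
  rw [bwd_main lines idx [s] (List.nodup_singleton s) s (List.mem_singleton_self s)]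
  simp [wsum, PySem.Dict.empty]

-- ===== VERDICT (by name: the statement is the Claim_ definition above) =====
theorem part2_spec : Claim_equal_part2 := by
  intro data _ _
  unfold Spec_part2
  exact part2_eq data
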